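-- pv_equiv track=rewrite | github.com/chj3748/TIL | Algorithm/programmers/pg_호텔 방 배정.py | solution
-- ===== SOURCE A (Python) =====
-- def solution(k, room_number):
--     from collections import defaultdict
--     rooms = defaultdict(int)
--     answer = []
--
--     def find_r(x):
--         if not rooms[x]:
--             rooms[x] = x + 1
--             return x
--         temp = find_r(rooms[x])
--         rooms[x] = temp + 1
--         return temp
--
--     for r in room_number:
--         answer.append(find_r(r))
--     return answer
-- ===== SOURCE B (Python) =====
-- def solution(k, room_number):
--     rooms = {}
--     answer = []
--     for r in room_number:
--         # walk the chain read-only, collecting every visited node (ending with the free room y)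
--         path = []
--         y = r
--         while rooms.get(y, 0):
--             path.append(y)
--             y = rooms.get(y, 0)
--         path.append(y)
--         # one compression pass: every node on the path now points to y + 1
--         for node in path:
--             rooms[node] = y + 1
--         answer.append(y)
--     return answer
-- ===== Notes on version B (the rewrite author's own statement) =====
-- stated objective: alternative
-- what changed: Replaces the recursive find (compression during stack unwinding) by a read-only iterative chain walk over a plain dict that collects the whole path in a list and then compresses it in one separate pass, avoiding recursion (and Python's recursion limit) entirely.
import Mathlib
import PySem

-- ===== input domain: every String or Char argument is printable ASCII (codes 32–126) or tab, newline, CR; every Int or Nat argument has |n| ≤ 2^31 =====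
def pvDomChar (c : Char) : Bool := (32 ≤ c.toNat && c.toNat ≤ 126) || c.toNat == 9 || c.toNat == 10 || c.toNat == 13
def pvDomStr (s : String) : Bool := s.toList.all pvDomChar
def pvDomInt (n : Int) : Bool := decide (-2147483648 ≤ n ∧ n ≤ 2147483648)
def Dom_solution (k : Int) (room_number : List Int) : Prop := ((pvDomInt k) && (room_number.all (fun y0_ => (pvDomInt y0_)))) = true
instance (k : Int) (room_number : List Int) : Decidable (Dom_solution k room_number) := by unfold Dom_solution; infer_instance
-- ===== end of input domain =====

-- B replaces A's recursive find-with-path-compression by a read-only iterative chain walk that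
-- collects the path in a list and compresses it in one separate pass; equal RETURN values proved.

-- ===== PORT A =====
-- A's recursive find_r. Fuel (= |room_number| + 1 at every call) is only a totality device:
-- one find visits strictly fewer nodes than there are occupied rooms, which is bounded by the
-- number of requests served so far, so the fallback branch is never reached on a real run.
def findA : Nat → PySem.Dict Int Int → Int → Int × PySem.Dict Int Int
  | 0, d, x => (x, d.insert x (x + 1))
  | fuel + 1, d, x =>
    if d.getD x 0 = 0 then (x, d.insert x (x + 1))
    else
      let p := findA fuel d (d.getD x 0)
      (p.1, p.2.insert x (p.1 + 1))

def solution (k : Int) (room_number : List Int) : List Int :=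
  (room_number.foldl
    (fun (st : PySem.Dict Int Int × List Int) r =>
      let p := findA (room_number.length + 1) st.1 r
      (p.2, st.2 ++ [p.1]))
    ((PySem.Dict.empty : PySem.Dict Int Int), ([] : List Int))).2

-- ===== PORT B =====
-- B's while loop: walk the chain WITHOUT touching the dict, returning the assigned room y and
-- the whole visited path (ending with y).  Same fuel device as for A.
def walkB : Nat → PySem.Dict Int Int → Int → List Int → Int × List Int
  | 0, _, cur, trail => (cur, trail ++ [cur])
  | gas + 1, rooms, cur, trail =>
    if rooms.getD cur 0 = 0 then (cur, trail ++ [cur])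
    else walkB gas rooms (rooms.getD cur 0) (trail ++ [cur])

-- B's compression pass: every node of the trail now points to assigned + 1
def compressB (rooms : PySem.Dict Int Int) (assigned : Int) (trail : List Int) : PySem.Dict Int Int :=
  trail.foldl (fun acc node => acc.insert node (assigned + 1)) rooms

-- B's main loop, one request at a time, building the answer front to back
def goB (gas : Nat) : PySem.Dict Int Int → List Int → List Int
  | _, [] => []
  | rooms, req :: rest =>
    let w := walkB gas rooms req []
    w.1 :: goB gas (compressB rooms w.1 w.2) rest

def solution_alt (k : Int) (room_number : List Int) : List Int :=
  goB (room_number.length + 1) PySem.Dict.empty room_number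

-- ===== PRECONDITION & SPEC =====
def Spec_solution (k : Int) (room_number : List Int) (out : List Int) : Prop := out = solution_alt k room_number
instance (k : Int) (room_number : List Int) (out : List Int) : Decidable (Spec_solution k room_number out) := by unfold Spec_solution; infer_instance

-- ===== CLAIM (what is proved, stated in full; the proofs are below) =====
def Claim_equal_solution : Prop := ∀ (k : Int) (room_number : List Int), Dom_solution k room_number → Spec_solution k room_number (solution k room_number)

-- ===== LEMMAS AND PROOFS =====

-- a key with a nonzero default lookup is present
lemma contains_of_getD_ne (d : PySem.Dict Int Int) (x : Int) (h : d.getD x 0 ≠ 0) :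
    d.contains x = true := by
  by_cases hc : d.contains x = true
  · exact hc
  · exact absurd (PySem.Dict.getD_of_not_contains d 0 (by simpa using hc)) h

-- inserting the SAME value u at a present key n commutes with inserting u at any key x
lemma insert_comm_same_val (d : PySem.Dict Int Int) (n x u : Int) (hn : d.contains n = true) :
    (d.insert n u).insert x u = (d.insert x u).insert n u := by
  by_cases hxn : x = n
  · subst hxn; rw [PySem.Dict.insert_insert_self]
  · apply PySem.Dict.ext
    by_cases hx : d.contains x = true
    · have h1 : (d.insert n u).contains x = true := by
        rw [PySem.Dict.contains_insert]; simp [hx]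
      have h2 : (d.insert x u).contains n = true := by
        rw [PySem.Dict.contains_insert]; simp [hn]
      rw [PySem.Dict.items_insert_of_contains _ _ h1,
          PySem.Dict.items_insert_of_contains _ _ hn,
          PySem.Dict.items_insert_of_contains _ _ h2,
          PySem.Dict.items_insert_of_contains _ _ hx]
      simp only [List.map_map]
      apply List.map_congr_left
      intro p _
      simp only [Function.comp_apply]
      by_cases h3 : p.1 = n
      · simp [h3, Ne.symm hxn]
      · by_cases h4 : p.1 = x <;> simp [h3, h4, hxn]
    · have hx' : d.contains x = false := by simpa using hx
      have h1 : (d.insert n u).contains x = false := by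
        rw [PySem.Dict.contains_insert]; simp [hx', hxn]
      have h2 : (d.insert x u).contains n = true := by
        rw [PySem.Dict.contains_insert]; simp [hn]
      rw [PySem.Dict.items_insert_of_not_contains _ _ h1,
          PySem.Dict.items_insert_of_contains _ _ hn,
          PySem.Dict.items_insert_of_contains _ _ h2,
          PySem.Dict.items_insert_of_not_contains _ _ hx']
      rw [List.map_append]
      simp [hxn]

-- membership is preserved by insert
lemma contains_insert_mono (d : PySem.Dict Int Int) (k v n : Int) (h : d.contains n = true) :
    (d.insert k v).contains n = true := by
  rw [PySem.Dict.contains_insert]; simp [h]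

-- the compression pass (all writes carry the same value u) commutes with one more insert of u
lemma foldl_insert_swap (path : List Int) (d : PySem.Dict Int Int) (x u : Int)
    (h : ∀ n ∈ path, d.contains n = true) :
    (path.foldl (fun dd n => dd.insert n u) d).insert x u
      = path.foldl (fun dd n => dd.insert n u) (d.insert x u) := by
  induction path generalizing d with
  | nil => rfl
  | cons n rest ih =>
    simp only [List.foldl_cons]
    rw [ih (d.insert n u) (fun m hm => contains_insert_mono _ _ _ _ (h m (List.mem_cons_of_mem _ hm))),
        insert_comm_same_val d n x u (h n (List.mem_cons_self ..))]

-- findA only inserts, so membership is preserved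
lemma findA_contains (fuel : Nat) (d : PySem.Dict Int Int) (x n : Int)
    (h : d.contains n = true) : (findA fuel d x).2.contains n = true := by
  induction fuel generalizing d x with
  | zero => exact contains_insert_mono _ _ _ _ h
  | succ fuel ih =>
    simp only [findA]
    split
    · exact contains_insert_mono _ _ _ _ h
    · exact contains_insert_mono _ _ _ _ (ih d _ h)

-- MAIN INVARIANT: the walk returns A's assigned room, and compressing the collected path gives
-- A's dict with the deferred writes over the accumulator replayed on top.
lemma walkB_eq_findA (fuel : Nat) (d : PySem.Dict Int Int) (x : Int) (path : List Int)
    (h : ∀ n ∈ path, d.contains n = true) :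
    (walkB fuel d x path).1 = (findA fuel d x).1 ∧
    compressB d (walkB fuel d x path).1 (walkB fuel d x path).2
      = path.foldl (fun dd n => dd.insert n ((findA fuel d x).1 + 1)) (findA fuel d x).2 := by
  induction fuel generalizing d x path with
  | zero =>
    refine ⟨rfl, ?_⟩
    simp only [walkB, findA, compressB, List.foldl_append, List.foldl_cons, List.foldl_nil]
    rw [foldl_insert_swap path d x (x + 1) h]
  | succ fuel ih =>
    simp only [walkB, findA]
    by_cases hv : d.getD x 0 = 0
    · simp only [if_pos hv]
      refine ⟨by simp, ?_⟩
      simp only [compressB, List.foldl_append, List.foldl_cons, List.foldl_nil]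
      rw [foldl_insert_swap path d x (x + 1) h]
    · simp only [if_neg hv]
      have hx : d.contains x = true := contains_of_getD_ne d x hv
      have hall : ∀ n ∈ path ++ [x], d.contains n = true := by
        intro n hn
        rcases List.mem_append.mp hn with h1 | h1
        · exact h n h1
        · simp at h1; subst h1; exact hx
      obtain ⟨ih1, ih2⟩ := ih d (d.getD x 0) (path ++ [x]) hall
      refine ⟨ih1, ?_⟩
      rw [ih2, List.foldl_append]
      simp only [List.foldl_cons, List.foldl_nil]
      rw [foldl_insert_swap path (findA fuel d (d.getD x 0)).2 x
            ((findA fuel d (d.getD x 0)).1 + 1)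
            (fun n hn => findA_contains fuel d (d.getD x 0) n (h n hn))]

-- one B step from the empty accumulator = one A step
lemma stepB_eq_stepA (fuel : Nat) (d : PySem.Dict Int Int) (r : Int) :
    (walkB fuel d r []).1 = (findA fuel d r).1 ∧
    compressB d (walkB fuel d r []).1 (walkB fuel d r []).2 = (findA fuel d r).2 := by
  obtain ⟨h1, h2⟩ := walkB_eq_findA fuel d r [] (by intro n hn; cases hn)
  exact ⟨h1, by simpa using h2⟩

-- B's cons-building loop equals A's foldl with an answer accumulator
lemma goB_eq_foldA (fuel : Nat) (rs : List Int) (d : PySem.Dict Int Int) (acc : List Int) :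
    (rs.foldl
      (fun (st : PySem.Dict Int Int × List Int) r =>
        let p := findA fuel st.1 r
        (p.2, st.2 ++ [p.1]))
      (d, acc)).2 = acc ++ goB fuel d rs := by
  induction rs generalizing d acc with
  | nil => simp [goB]
  | cons r rest ih =>
    obtain ⟨h1, h2⟩ := stepB_eq_stepA fuel d r
    simp only [List.foldl_cons, goB]
    rw [ih, ← h2, h1]
    simp

-- ===== VERDICT (by name: the statement is the Claim_ definition above) =====
theorem solution_spec : Claim_equal_solution := by
  intro k room_number _
  unfold Spec_solution solution solution_alt
  rw [goB_eq_foldA (room_number.length + 1) room_number PySem.Dict.empty []]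
  simp
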